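-- pv_equiv track=rewrite | github.com/MajaHealth/SensorFirmware | test_icg_ecg_drift_1hour.py | count_samples_between_syncs
-- ===== SOURCE A (Python) =====
-- from typing import Dict, List, Tuple, Optional
--
-- def count_samples_between_syncs(data_sets: List, sync_marks: List,
--                                device_type: str = 'ECG') -> Dict:
--     """Count actual samples between consecutive sync marks
--
--     Args:
--         data_sets: List of data packets
--         sync_marks: List of sync mark tuples (sync_num, timestamp, pos, total, packet_idx)
--         device_type: 'ECG' or 'ICG'
--
--     Returns:
--         Dict mapping sync_num to sample count between this sync and next sync
--     """
--     sample_counts = {}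
--
--     # Magic numbers to identify sync marks
--     ecg_magic = -99999
--     icg_magic = -999990000
--     magic = ecg_magic if device_type == 'ECG' else icg_magic
--
--     for i in range(len(sync_marks) - 1):
--         sync_num1, _, pos1, total1, packet_idx1 = sync_marks[i]
--         sync_num2, _, pos2, total2, packet_idx2 = sync_marks[i + 1]
--
--         # Count samples between the two sync marks
--         sample_count = 0
--
--         # Case 1: Both syncs in same packet (rare but possible)
--         if packet_idx1 == packet_idx2:
--             # Samples between pos1 and pos2 (excluding the sync marks themselves)
--             sample_count = pos2 - pos1 - 1
--
--         # Case 2: Syncs in different packets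
--         else:
--             # Count samples after first sync in its packet
--             sample_count += (total1 - pos1 - 1)
--
--             # Count all samples in intermediate packets
--             for packet_idx in range(packet_idx1 + 1, packet_idx2):
--                 if packet_idx < len(data_sets):
--                     data_array = data_sets[packet_idx]['data']
--                     # Count all non-sync samples
--                     for sample in data_array:
--                         if isinstance(sample, (list, tuple)) and len(sample) > 0:
--                             if sample[0] != magic:
--                                 sample_count += 1
--
--             # Count samples before second sync in its packet
--             sample_count += pos2
--
--         sample_counts[sync_num1] = sample_count
--
--     return sample_counts
-- ===== SOURCE B (Python) =====
-- def count_samples_between_syncs(data_sets, sync_marks, device_type='ECG'):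
--     """Prefix-sum re-implementation: per-packet non-sync sample counts are
--     accumulated once into a prefix table, so each sync pair is O(1)."""
--     magic = -99999 if device_type == 'ECG' else -999990000
--     n = len(data_sets)
--     P = [0]
--     acc = 0
--     for packet in data_sets:
--         data = packet.get('data', [])
--         acc += sum(1 for s in data
--                    if isinstance(s, (list, tuple)) and len(s) > 0 and s[0] != magic)
--         P.append(acc)
--     out = {}
--     for m1, m2 in zip(sync_marks, sync_marks[1:]):
--         s1, _, pos1, tot1, p1 = m1
--         _, _, pos2, _, p2 = m2
--         if p1 == p2:
--             out[s1] = pos2 - pos1 - 1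
--         else:
--             lo = min(max(p1 + 1, 0), n)
--             hi = min(max(p2, lo), n)
--             out[s1] = (tot1 - pos1 - 1) + (P[hi] - P[lo]) + pos2
--     return out
-- ===== Notes on version B (the rewrite author's own statement) =====
-- stated objective: faster
-- what changed: B precomputes one prefix-sum table of per-packet non-sync sample counts and answers each consecutive sync pair with a clamped O(1) table lookup, replacing A's rescans of every intermediate packet for every pair.
-- outside the precondition, e.g. on count_samples_between_syncs([{}], [(0, 0, 0, 2, -1), (1, 0, 1, 2, 1)], 'ECG'): A raises KeyError, B returns {0: 2}
import Mathlib
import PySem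

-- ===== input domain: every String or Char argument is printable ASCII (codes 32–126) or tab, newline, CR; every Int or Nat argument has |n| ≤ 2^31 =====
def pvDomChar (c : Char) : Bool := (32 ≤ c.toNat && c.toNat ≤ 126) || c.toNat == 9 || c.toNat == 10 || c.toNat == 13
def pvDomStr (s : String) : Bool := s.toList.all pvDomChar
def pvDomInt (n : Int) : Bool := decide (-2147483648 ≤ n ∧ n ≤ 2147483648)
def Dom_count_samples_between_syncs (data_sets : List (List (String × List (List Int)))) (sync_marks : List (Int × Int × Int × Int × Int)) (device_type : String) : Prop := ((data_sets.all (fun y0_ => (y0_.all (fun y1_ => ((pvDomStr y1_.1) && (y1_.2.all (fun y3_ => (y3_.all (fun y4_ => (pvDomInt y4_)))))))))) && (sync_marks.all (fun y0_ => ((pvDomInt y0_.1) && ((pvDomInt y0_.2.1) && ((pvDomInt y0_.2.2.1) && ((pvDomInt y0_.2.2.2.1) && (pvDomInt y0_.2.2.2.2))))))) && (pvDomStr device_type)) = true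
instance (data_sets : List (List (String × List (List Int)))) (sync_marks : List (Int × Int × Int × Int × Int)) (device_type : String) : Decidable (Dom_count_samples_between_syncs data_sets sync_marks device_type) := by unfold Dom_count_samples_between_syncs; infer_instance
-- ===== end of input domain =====

-- B replaces A's per-pair rescan of intermediate packets by one prefix-sum table of
-- per-packet non-sync sample counts, answering each sync pair with an O(1) lookup.

-- ===== PORT A =====
-- 'data_sets[packet_idx]["data"]' is ported with pyGetD/Dict.getD defaults; Pre_ excludes
-- the inputs where Python would wrap a negative index or raise (IndexError/KeyError).
def count_samples_between_syncs (data_sets : List (List (String × List (List Int)))) (sync_marks : List (Int × Int × Int × Int × Int)) (device_type : String) : List (Int × Int) :=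
  let ecg_magic : Int := -99999
  let icg_magic : Int := -999990000
  let magic : Int := if device_type = "ECG" then ecg_magic else icg_magic
  let sample_counts : PySem.Dict Int Int :=
    (PySem.List.pyRange 0 ((sync_marks.length : Int) - 1) 1).foldl
      (fun (d : PySem.Dict Int Int) i =>
        let m1 := PySem.List.pyGetD sync_marks i (0, 0, 0, 0, 0)
        let m2 := PySem.List.pyGetD sync_marks (i + 1) (0, 0, 0, 0, 0)
        let sample_count : Int :=
          if m1.2.2.2.2 = m2.2.2.2.2 then
            m2.2.2.1 - m1.2.2.1 - 1
          else
            (((PySem.List.pyRange (m1.2.2.2.2 + 1) m2.2.2.2.2 1).foldl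
              (fun sc packet_idx =>
                if packet_idx < (data_sets.length : Int) then
                  ((PySem.Dict.mk (PySem.List.pyGetD data_sets packet_idx [])).getD "data" []).foldl
                    (fun sc sample =>
                      if 0 < sample.length then
                        if PySem.List.pyGetD sample 0 0 ≠ magic then sc + 1 else sc
                      else sc) sc
                else sc)
              (m1.2.2.2.1 - m1.2.2.1 - 1)) + m2.2.2.1)
        d.insert m1.1 sample_count)
      PySem.Dict.empty
  sample_counts.items

-- ===== PORT B =====
def pvCnt (magic : Int) (packet : List (String × List (List Int))) : Int :=
  ((PySem.Dict.mk packet).getD "data" []).countP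
    (fun s => decide (0 < s.length) && decide (PySem.List.pyGetD s 0 0 ≠ magic))

def count_samples_between_syncs_alt (data_sets : List (List (String × List (List Int)))) (sync_marks : List (Int × Int × Int × Int × Int)) (device_type : String) : List (Int × Int) :=
  let magic : Int := if device_type = "ECG" then -99999 else -999990000
  let n : Int := (data_sets.length : Int)
  let P : List Int :=
    (data_sets.foldl
      (fun (st : List Int × Int) packet =>
        (st.1 ++ [st.2 + pvCnt magic packet], st.2 + pvCnt magic packet))
      ([0], 0)).1
  let out : PySem.Dict Int Int :=
    (sync_marks.zip (sync_marks.drop 1)).foldl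
      (fun (d : PySem.Dict Int Int) m =>
        let v : Int :=
          if m.1.2.2.2.2 = m.2.2.2.2.2 then
            m.2.2.2.1 - m.1.2.2.1 - 1
          else
            (m.1.2.2.2.1 - m.1.2.2.1 - 1) +
              (P.getD (min (max m.2.2.2.2.2 (min (max (m.1.2.2.2.2 + 1) 0) n)) n).toNat 0 -
               P.getD (min (max (m.1.2.2.2.2 + 1) 0) n).toNat 0) + m.2.2.2.1
        d.insert m.1.1 v)
      PySem.Dict.empty
  out.items

-- ===== PRECONDITION & SPEC =====
-- Pre_ excludes inputs on which Python A dereferences an intermediate packet at a negative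
-- index (wraparound or IndexError — an artefact of CPython indexing) or at a packet whose
-- dict lacks the 'data' key (KeyError).
def Pre_count_samples_between_syncs (data_sets : List (List (String × List (List Int)))) (sync_marks : List (Int × Int × Int × Int × Int)) (device_type : String) : Prop :=
  ∀ m ∈ sync_marks.zip (sync_marks.drop 1),
    m.1.2.2.2.2 ≠ m.2.2.2.2.2 →
      (m.1.2.2.2.2 + 1 < m.2.2.2.2.2 → 0 ≤ m.1.2.2.2.2 + 1) ∧
      ∀ k < data_sets.length,
        m.1.2.2.2.2 + 1 ≤ (k : Int) → (k : Int) < m.2.2.2.2.2 →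
          (PySem.Dict.mk (data_sets.getD k [])).contains "data" = true
instance (data_sets : List (List (String × List (List Int)))) (sync_marks : List (Int × Int × Int × Int × Int)) (device_type : String) : Decidable (Pre_count_samples_between_syncs data_sets sync_marks device_type) := by unfold Pre_count_samples_between_syncs; infer_instance

def pvWitness_count_samples_between_syncs : (List (List (String × List (List Int)))) × (List (Int × Int × Int × Int × Int)) × String :=
  ([[("data", [[1], [-99999], [2]])]], [(0, 10, 0, 3, 0), (1, 20, 2, 3, 0), (2, 30, 1, 4, 1)], "ECG")

def Spec_count_samples_between_syncs (data_sets : List (List (String × List (List Int)))) (sync_marks : List (Int × Int × Int × Int × Int)) (device_type : String) (out : List (Int × Int)) : Prop := out = count_samples_between_syncs_alt data_sets sync_marks device_type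
instance (data_sets : List (List (String × List (List Int)))) (sync_marks : List (Int × Int × Int × Int × Int)) (device_type : String) (out : List (Int × Int)) : Decidable (Spec_count_samples_between_syncs data_sets sync_marks device_type out) := by unfold Spec_count_samples_between_syncs; infer_instance

-- ===== CLAIM (what is proved, stated in full; the proofs are below) =====
def Claim_equal_count_samples_between_syncs : Prop := ∀ (data_sets : List (List (String × List (List Int)))) (sync_marks : List (Int × Int × Int × Int × Int)) (device_type : String), Dom_count_samples_between_syncs data_sets sync_marks device_type → Pre_count_samples_between_syncs data_sets sync_marks device_type → Spec_count_samples_between_syncs data_sets sync_marks device_type (count_samples_between_syncs data_sets sync_marks device_type)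

-- ===== LEMMAS AND PROOFS =====

lemma pv_witness_ok : Dom_count_samples_between_syncs (pvWitness_count_samples_between_syncs.1) (pvWitness_count_samples_between_syncs.2.1) (pvWitness_count_samples_between_syncs.2.2) ∧ Pre_count_samples_between_syncs (pvWitness_count_samples_between_syncs.1) (pvWitness_count_samples_between_syncs.2.1) (pvWitness_count_samples_between_syncs.2.2) := by
  constructor <;> decide

-- prefix sum of per-packet counts
def pvPre (magic : Int) (ds : List (List (String × List (List Int)))) (k : Nat) : Int :=
  ((ds.take k).map (pvCnt magic)).sum

lemma pv_count_fold (magic : Int) (data : List (List Int)) (sc : Int) :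
    data.foldl (fun sc sample =>
        if 0 < sample.length then
          if PySem.List.pyGetD sample 0 0 ≠ magic then sc + 1 else sc
        else sc) sc
    = sc + (data.countP (fun s => decide (0 < s.length) && decide (PySem.List.pyGetD s 0 0 ≠ magic)) : Int) := by
  induction data generalizing sc with
  | nil => simp
  | cons s t ih =>
    simp only [List.foldl_cons, List.countP_cons, ih]
    by_cases h1 : 0 < s.length <;> by_cases h2 : PySem.List.pyGetD s 0 0 ≠ magic <;>
      simp [h1, h2] <;> push_cast <;> ring

lemma pv_pre_succ (magic : Int) (ds : List (List (String × List (List Int)))) (t : Nat)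
    (h : t < ds.length) :
    pvPre magic ds (t + 1) = pvPre magic ds t + pvCnt magic (ds.getD t []) := by
  unfold pvPre
  rw [List.getD_eq_getElem ds [] h, List.take_succ, List.getElem?_eq_getElem h,
    Option.toList_some, List.map_append, List.sum_append]
  simp

lemma pv_P_spec (magic : Int) (ds : List (List (String × List (List Int)))) :
    ∀ (P0 : List Int) (a0 : Int),
    (ds.foldl (fun (st : List Int × Int) packet =>
        (st.1 ++ [st.2 + pvCnt magic packet], st.2 + pvCnt magic packet)) (P0, a0)).1
    = P0 ++ (List.range ds.length).map (fun k => a0 + pvPre magic ds (k + 1)) := by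
  induction ds with
  | nil => simp
  | cons p t ih =>
    intro P0 a0
    simp only [List.foldl_cons, ih, List.length_cons, List.range_succ_eq_map, List.map_cons,
      List.map_map, List.append_assoc, List.singleton_append]
    congr 1
    congr 1
    apply List.map_congr_left
    intro k _
    simp only [Function.comp_apply]
    have hx : pvPre magic (p :: t) (k.succ + 1) = pvCnt magic p + pvPre magic t (k + 1) := by
      unfold pvPre
      rw [show k.succ + 1 = (k + 1) + 1 from rfl, List.take_succ_cons]
      simp
    rw [hx]
    ring

lemma pv_P_getD (magic : Int) (ds : List (List (String × List (List Int)))) (k : Nat)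
    (hk : k ≤ ds.length) :
    ((ds.foldl (fun (st : List Int × Int) packet =>
        (st.1 ++ [st.2 + pvCnt magic packet], st.2 + pvCnt magic packet)) ([0], 0)).1).getD k 0
    = pvPre magic ds k := by
  rw [pv_P_spec]
  cases k with
  | zero => simp [pvPre]
  | succ j =>
    have hj : j < ds.length := by omega
    have : ([(0 : Int)] ++ (List.range ds.length).map (fun k => 0 + pvPre magic ds (k + 1))).getD (j + 1) 0
        = ((List.range ds.length).map (fun k => 0 + pvPre magic ds (k + 1))).getD j 0 := by
      simp [List.getD]
    rw [this, List.getD_eq_getElem _ _ (by simpa using hj)]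
    simp

lemma pv_range_sum (magic : Int) (ds : List (List (String × List (List Int)))) (a : Int)
    (ha : 0 ≤ a) : ∀ (m : Nat) (sc : Int),
    (PySem.List.pyRange a (a + m) 1).foldl
        (fun sc pk => if pk < (ds.length : Int) then sc + pvCnt magic (PySem.List.pyGetD ds pk []) else sc) sc
    = sc + (pvPre magic ds (min (a + m).toNat ds.length) - pvPre magic ds (min a.toNat ds.length)) := by
  intro m
  induction m with
  | zero =>
    intro sc
    rw [PySem.List.pyRange_one_eq_nil (by omega)]
    simp
  | succ m ih =>
    intro sc
    have hcast : a + ((m : Int) + 1) = (a + m) + 1 := by ring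
    push_cast
    rw [hcast, PySem.List.pyRange_one_succ_right (by omega), List.foldl_append]
    simp only [List.foldl_cons, List.foldl_nil, ih]
    by_cases h : (a + m : Int) < (ds.length : Int)
    · have hge : PySem.List.pyGetD ds (a + m) [] = ds.getD (a + (m : Int)).toNat [] := by
        have h0 : (0 : Int) ≤ a + ↑m := by omega
        rw [PySem.List.pyGetD_eq_getElem ds [] h0 h, List.getD_eq_getElem ds [] (by omega)]
      have hmin1 : min ((a + m : Int) + 1).toNat ds.length = (a + (m : Int)).toNat + 1 := by omega
      have hmin2 : min (a + (m : Int)).toNat ds.length = (a + (m : Int)).toNat := by omega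
      rw [if_pos h, hge, hmin1, hmin2, pv_pre_succ magic ds _ (by omega)]
      ring
    · have hmin1 : min ((a + m : Int) + 1).toNat ds.length = ds.length := by omega
      have hmin2 : min (a + (m : Int)).toNat ds.length = ds.length := by omega
      rw [if_neg h, hmin1, hmin2]

lemma pv_zip_eq (xs : List (Int × Int × Int × Int × Int)) :
    (List.range (xs.length - 1)).map
        (fun k => (xs.getD k (0, 0, 0, 0, 0), xs.getD (k + 1) (0, 0, 0, 0, 0)))
    = xs.zip (xs.drop 1) := by
  apply List.ext_getElem
  · simp
  · intro i h1 h2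
    simp only [List.getElem_map, List.getElem_range, List.getElem_zip, List.getElem_drop]
    have hlen : i < xs.length - 1 := by simpa using h1
    rw [List.getD_eq_getElem xs _ (by omega), List.getD_eq_getElem xs _ (by omega)]
    simp [Nat.add_comm]

lemma pv_value (magic : Int) (ds : List (List (String × List (List Int))))
    (p1 tot1 pos1 pos2 p2 : Int) (h0 : p1 + 1 < p2 → 0 ≤ p1 + 1) :
    ((PySem.List.pyRange (p1 + 1) p2 1).foldl
        (fun sc pk => if pk < (ds.length : Int) then sc + pvCnt magic (PySem.List.pyGetD ds pk []) else sc)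
        (tot1 - pos1 - 1)) + pos2
    = (tot1 - pos1 - 1) +
        (((ds.foldl (fun (st : List Int × Int) packet =>
            (st.1 ++ [st.2 + pvCnt magic packet], st.2 + pvCnt magic packet)) ([0], 0)).1).getD
            (min (max p2 (min (max (p1 + 1) 0) (ds.length : Int))) (ds.length : Int)).toNat 0 -
         ((ds.foldl (fun (st : List Int × Int) packet =>
            (st.1 ++ [st.2 + pvCnt magic packet], st.2 + pvCnt magic packet)) ([0], 0)).1).getD
            (min (max (p1 + 1) 0) (ds.length : Int)).toNat 0) + pos2 := by
  by_cases hlt : p1 + 1 < p2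
  · have ha : 0 ≤ p1 + 1 := h0 hlt
    have hm : p2 = (p1 + 1) + ((p2 - (p1 + 1)).toNat : Int) := by omega
    rw [hm, pv_range_sum magic ds (p1 + 1) ha]
    have e1 : (min (max ((p1 + 1) + ((p2 - (p1 + 1)).toNat : Int))
        (min (max (p1 + 1) 0) (ds.length : Int))) (ds.length : Int)).toNat
        = min ((p1 + 1) + ((p2 - (p1 + 1)).toNat : Int)).toNat ds.length := by omega
    have e2 : (min (max (p1 + 1) 0) (ds.length : Int)).toNat = min (p1 + 1).toNat ds.length := by omega
    rw [e1, e2, pv_P_getD magic ds _ (by omega), pv_P_getD magic ds _ (by omega)]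
  · rw [PySem.List.pyRange_one_eq_nil (by omega)]
    have e3 : (min (max p2 (min (max (p1 + 1) 0) (ds.length : Int))) (ds.length : Int)).toNat
        = (min (max (p1 + 1) 0) (ds.length : Int)).toNat := by omega
    rw [e3]
    simp

theorem pv_main (ds : List (List (String × List (List Int))))
    (sm : List (Int × Int × Int × Int × Int)) (dt : String)
    (hpre : Pre_count_samples_between_syncs ds sm dt) :
    count_samples_between_syncs ds sm dt = count_samples_between_syncs_alt ds sm dt := by
  unfold count_samples_between_syncs count_samples_between_syncs_alt
  simp only []
  congr 1
  have hr : (((sm.length : Int) - 1) - 0).toNat = sm.length - 1 := by omega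
  rw [PySem.List.pyRange_one 0 ((sm.length : Int) - 1), hr, List.foldl_map, ← pv_zip_eq sm,
    List.foldl_map]
  apply PySem.List.foldl_congr_mem
  intro acc k hk
  have hmzip : (sm.getD k (0, 0, 0, 0, 0), sm.getD (k + 1) (0, 0, 0, 0, 0)) ∈ sm.zip (sm.drop 1) := by
    rw [← pv_zip_eq]
    exact List.mem_map_of_mem hk
  dsimp only
  have e1 : PySem.List.pyGetD sm ((0 : Int) + (k : Int)) (0, 0, 0, 0, 0) = sm.getD k (0, 0, 0, 0, 0) := by
    rw [show (0 : Int) + (k : Int) = ((k : Nat) : Int) by omega, PySem.List.pyGetD_natCast]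
  have e2 : PySem.List.pyGetD sm ((0 : Int) + (k : Int) + 1) (0, 0, 0, 0, 0) = sm.getD (k + 1) (0, 0, 0, 0, 0) := by
    rw [show (0 : Int) + (k : Int) + 1 = (((k + 1) : Nat) : Int) by push_cast; ring,
      PySem.List.pyGetD_natCast]
  rw [e1, e2]
  by_cases hne : (sm.getD k (0, 0, 0, 0, 0)).2.2.2.2 = (sm.getD (k + 1) (0, 0, 0, 0, 0)).2.2.2.2
  · rw [if_pos hne, if_pos hne]
  · have hc := (hpre _ hmzip hne).1
    rw [if_neg hne, if_neg hne]
    congr 1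
    simp only [pv_count_fold]
    have hv := pv_value (if dt = "ECG" then (-99999 : Int) else -999990000) ds
      (sm.getD k (0, 0, 0, 0, 0)).2.2.2.2 (sm.getD k (0, 0, 0, 0, 0)).2.2.2.1
      (sm.getD k (0, 0, 0, 0, 0)).2.2.1 (sm.getD (k + 1) (0, 0, 0, 0, 0)).2.2.1
      (sm.getD (k + 1) (0, 0, 0, 0, 0)).2.2.2.2 hc
    simpa [pvCnt] using hv

-- ===== VERDICT (by name: the statement is the Claim_ definition above) =====
theorem count_samples_between_syncs_spec : Claim_equal_count_samples_between_syncs := by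
  intro ds sm dt _ hpre
  unfold Spec_count_samples_between_syncs
  exact pv_main ds sm dt hpre
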